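-- pv_equiv track=rewrite | github.com/huda88/Assignment-6 | Assigment6b.py | func12
-- ===== SOURCE A (Python) =====
-- def func12(lst, number):
--     small = []
--     great= []
--     for j in lst:
--         if j < number:
--             small.append(j)
--         else:
--             great.append(j)
--     small += great
--     return small
-- ===== SOURCE B (Python) =====
-- def func12(lst, number):
--     # Stable sort by the boolean key (x >= number): elements < number get key
--     # False (0) and keep their order first, the rest follow in order.
--     return sorted(lst, key=lambda x: x >= number)
-- ===== Notes on version B (the rewrite author's own statement) =====
-- stated objective: idiomatic
-- what changed: Replaced the manual two-accumulator partition pass with a single sorted() call keyed on the boolean x >= number, relying on sort stability to keep each group's order.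
import Mathlib
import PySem

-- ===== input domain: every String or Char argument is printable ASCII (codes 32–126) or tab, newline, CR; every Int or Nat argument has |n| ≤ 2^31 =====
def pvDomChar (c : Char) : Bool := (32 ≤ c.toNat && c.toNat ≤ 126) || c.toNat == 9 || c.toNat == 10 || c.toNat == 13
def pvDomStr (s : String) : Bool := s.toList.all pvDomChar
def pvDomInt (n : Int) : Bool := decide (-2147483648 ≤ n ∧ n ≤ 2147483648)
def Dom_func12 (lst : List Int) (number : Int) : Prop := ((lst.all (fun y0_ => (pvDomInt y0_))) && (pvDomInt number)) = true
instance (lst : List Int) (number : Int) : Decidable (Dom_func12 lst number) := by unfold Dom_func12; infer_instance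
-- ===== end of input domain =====

-- B replaces A's manual two-accumulator partition with a stable sort on the boolean key (x >= number); idiomatic, not faster.


-- ===== PORT A =====
-- literal port: one pass appending to `small`/`great`, then small += great
def func12 (lst : List Int) (number : Int) : List Int :=
  let p := lst.foldl (fun (sg : List Int × List Int) j =>
    if j < number then (sg.1 ++ [j], sg.2) else (sg.1, sg.2 ++ [j])) ([], [])
  p.1 ++ p.2

-- ===== PORT B =====
-- port of Source B: sorted(lst, key=lambda x: x >= number)  (Bool: false < true, as in Python)
def func12_alt (lst : List Int) (number : Int) : List Int :=
  PySem.List.sorted lst (fun x => decide (number ≤ x)) false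

-- ===== PRECONDITION & SPEC =====
def Spec_func12 (lst : List Int) (number : Int) (out : List Int) : Prop := out = func12_alt lst number
instance (lst : List Int) (number : Int) (out : List Int) : Decidable (Spec_func12 lst number out) := by unfold Spec_func12; infer_instance

-- ===== CLAIM (what is proved, stated in full; the proofs are below) =====
def Claim_equal_func12 : Prop := ∀ (lst : List Int) (number : Int), Dom_func12 lst number → Spec_func12 lst number (func12 lst number)

-- ===== LEMMAS AND PROOFS =====

-- A's loop accumulates the two filters
theorem funcA_inv (number : Int) (lst s g : List Int) :
    lst.foldl (fun (sg : List Int × List Int) j =>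
      if j < number then (sg.1 ++ [j], sg.2) else (sg.1, sg.2 ++ [j])) (s, g)
    = (s ++ lst.filter (fun x => decide (x < number)),
       g ++ lst.filter (fun x => !decide (x < number))) := by
  induction lst generalizing s g with
  | nil => simp
  | cons j t ih =>
      by_cases h : j < number <;> simp [List.foldl_cons, h, ih, List.filter_cons]

-- inserting an element whose key is true goes to the very end
theorem insertBy_true (number x : Int) (h : number ≤ x) (ys : List Int) :
    PySem.List.insertBy
      (fun a b => decide ((decide (number ≤ a) : Bool) < (decide (number ≤ b) : Bool)))
      x ys = ys ++ [x] := by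
  induction ys with
  | nil => rfl
  | cons y t ih =>
      simp only [PySem.List.insertBy]
      have : ((decide (number ≤ x) : Bool) < (decide (number ≤ y) : Bool)) = False := by
        simp [h, Bool.lt_iff]
      simp [this, ih]

-- inserting an element whose key is false goes after all false-key elements, before the true-key block
theorem insertBy_false (number x : Int) (hx : x < number) (s g : List Int)
    (hs : ∀ a ∈ s, a < number) (hg : ∀ a ∈ g, number ≤ a) :
    PySem.List.insertBy
      (fun a b => decide ((decide (number ≤ a) : Bool) < (decide (number ≤ b) : Bool)))
      x (s ++ g) = (s ++ [x]) ++ g := by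
  induction s with
  | nil =>
      cases g with
      | nil => rfl
      | cons z t =>
          have hz : number ≤ z := hg z (by simp)
          simp only [PySem.List.insertBy, List.nil_append]
          have : ((decide (number ≤ x) : Bool) < (decide (number ≤ z) : Bool)) = True := by
            simp [Bool.lt_iff, hz, not_le.mpr hx]
          simp [this]
  | cons y t ih =>
      have hy : y < number := hs y (by simp)
      simp only [List.cons_append, PySem.List.insertBy]
      have : ((decide (number ≤ x) : Bool) < (decide (number ≤ y) : Bool)) = False := by
        simp [Bool.lt_iff, not_le.mpr hy]
      simp only [this, Bool.false_eq_true, if_false]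
      rw [ih (fun a ha => hs a (by simp [ha]))]
      simp

-- B's insertion-sort loop maintains the partitioned shape
theorem funcB_inv (number : Int) (lst s g : List Int)
    (hs : ∀ a ∈ s, a < number) (hg : ∀ a ∈ g, number ≤ a) :
    lst.foldl (fun acc x =>
      PySem.List.insertBy
        (fun a b => decide ((decide (number ≤ a) : Bool) < (decide (number ≤ b) : Bool)))
        x acc) (s ++ g)
    = (s ++ lst.filter (fun x => decide (x < number)))
      ++ (g ++ lst.filter (fun x => !decide (x < number))) := by
  induction lst generalizing s g with
  | nil => simp
  | cons j t ih =>
      by_cases h : j < number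
      · have hs' : ∀ a ∈ s ++ [j], a < number := by
          intro a ha; rcases List.mem_append.1 ha with h' | h'
          · exact hs a h'
          · simp at h'; omega
        rw [List.foldl_cons, insertBy_false number j h s g hs hg,
          ih (s ++ [j]) g hs' hg]
        simp [h]
      · have hg' : ∀ a ∈ g ++ [j], number ≤ a := by
          intro a ha; rcases List.mem_append.1 ha with h' | h'
          · exact hg a h'
          · simp at h'; omega
        rw [List.foldl_cons, ← List.append_assoc, insertBy_true number j (not_lt.1 h),
          List.append_assoc, ih s (g ++ [j]) hs hg']
        simp [h]

-- ===== VERDICT (by name: the statement is the Claim_ definition above) =====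
theorem func12_spec : Claim_equal_func12 := by
  intro lst number _
  unfold Spec_func12 func12 func12_alt
  rw [PySem.List.sorted_eq_foldl_insertBy]
  have hB := funcB_inv number lst [] [] (by simp) (by simp)
  simp only [List.nil_append] at hB
  rw [hB, funcA_inv]
  simp
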